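-- pv_equiv track=rewrite | github.com/alpesis-ai/hangmanbot | hangmanbot/hangman/guessletter.py | _create_letter_pattern
-- ===== SOURCE A (Python) =====
-- def count_unknown(givenWord):
--     """Returns # of unknown letters of a given word.
--     """
--     return sum([1 for letter in givenWord if letter == '*'])
--
-- def _create_letter_pattern(givenWord, guessedLetters):
--     """Returns letter patterns by finding ngram.
--     """
--
--     # subPattern: [^dc]
--     letters = [letter.lower() for letter in guessedLetters]
--     subPattern = '([^' + ''.join(letter for letter in letters) + '])'
--
--     # letterGrams: i.e. [*ab], [ab*]
--     # letterPatterns: one unknown letter allowed, i.e. ab[^dc], [^dc]ab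
--     matchedPatterns = []
--     numOfKnown = len(givenWord) - count_unknown(givenWord)
--     for thisNumOfKnown in range(1, numOfKnown+1):
--         letterGrams = _find_ngram([letter for letter in givenWord.lower()],
--                                   thisNumOfKnown+1)
--
--         for letterGram in letterGrams:
--             thisNumOfUnknown = count_unknown(letterGram)
--             if thisNumOfUnknown == 1:
--                 thisPattern = [subPattern if letter == '*' else letter.lower() for letter in letterGram]
--                 thisPattern = ''.join(letter for letter in thisPattern)
--                 matchedPatterns.append(thisPattern)
--
--     return matchedPatterns
--
-- def _find_ngram(words, n):
--     """Returns letter ngram by n in a word.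
--     """
--
--     return zip(*[words[i:] for i in range(n)])
-- ===== SOURCE B (Python) =====
-- def _create_letter_pattern(givenWord, guessedLetters):
--     """Returns letter patterns by finding ngram.
--
--     One pass builds a prefix-sum of '*' counts; windows with exactly one
--     unknown are then enumerated directly by (length, start) and the pattern
--     is built by slicing instead of per-letter mapping.
--     """
--     subPattern = '([^' + ''.join(l.lower() for l in guessedLetters) + '])'
--     w = givenWord.lower()
--     L = len(w)
--     pre = [0]
--     for c in w:
--         pre.append(pre[-1] + (1 if c == '*' else 0))
--     numOfKnown = L - pre[L]
--     matchedPatterns = []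
--     for length in range(2, numOfKnown + 2):
--         for i in range(L - length + 1):
--             if pre[i + length] - pre[i] == 1:
--                 seg = w[i:i + length]
--                 j = seg.index('*')
--                 matchedPatterns.append(seg[:j] + subPattern + seg[j + 1:])
--     return matchedPatterns
-- ===== Notes on version B (the rewrite author's own statement) =====
-- stated objective: faster
-- what changed: Replaces regenerating every n-gram per window length (zip of slices) and per-letter mapping with one prefix-sum of '*' counts, direct (length,start) window enumeration, and pattern building by slicing at the single unknown's index.
import Mathlib
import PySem

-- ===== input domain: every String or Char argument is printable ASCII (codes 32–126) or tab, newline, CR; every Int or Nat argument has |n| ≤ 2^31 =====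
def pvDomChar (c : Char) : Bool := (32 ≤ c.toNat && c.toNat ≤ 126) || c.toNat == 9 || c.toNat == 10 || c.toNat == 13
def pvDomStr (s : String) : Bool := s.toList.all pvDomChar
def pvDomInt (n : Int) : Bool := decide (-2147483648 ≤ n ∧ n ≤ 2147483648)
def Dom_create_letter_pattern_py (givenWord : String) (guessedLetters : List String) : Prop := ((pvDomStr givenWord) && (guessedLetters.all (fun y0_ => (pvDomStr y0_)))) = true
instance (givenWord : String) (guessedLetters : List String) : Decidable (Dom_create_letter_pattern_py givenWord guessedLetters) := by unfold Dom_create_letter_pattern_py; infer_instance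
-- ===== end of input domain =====

-- B: prefix-sum star counts + direct window enumeration instead of rebuilding all n-grams per length (faster; same return value).


-- ===== PORT A =====
def pvCountUnknown (xs : List Char) : Int :=
  ((xs.filter (fun letter => letter == '*')).map (fun _ => (1 : Int))).sum

-- zip(*[words[i:] for i in range(n)]): Python's zip stops at the shortest list; ported by hand
-- (exact: fuel words.length+1 always suffices, since each step shortens every list by one)
def pvFindNgramGo (fuel : Nat) (ls : List (List Char)) : List (List Char) :=
  match fuel with
  | 0 => []
  | fuel + 1 =>
    if ls.isEmpty || ls.any List.isEmpty then []
    else (ls.map (fun l => l.headD ' ')) :: pvFindNgramGo fuel (ls.map List.tail)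

def pvFindNgram (words : List Char) (n : Int) : List (List Char) :=
  pvFindNgramGo (words.length + 1) ((PySem.List.pyRange 0 n).map (fun i => PySem.List.slice words (some i) none))

def create_letter_pattern_py (givenWord : String) (guessedLetters : List String) : List String :=
  let letters := guessedLetters.map (fun letter => PySem.Chars.lower letter.toList)
  let subPattern := ['(', '[', '^'] ++ PySem.Chars.join [] letters ++ [']', ')']
  let numOfKnown : Int := (givenWord.toList.length : Int) - pvCountUnknown givenWord.toList
  (PySem.List.pyRange 1 (numOfKnown + 1)).foldl (fun matchedPatterns thisNumOfKnown =>
    (pvFindNgram (PySem.Chars.lower givenWord.toList) (thisNumOfKnown + 1)).foldl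
      (fun acc letterGram =>
        if pvCountUnknown letterGram = 1 then
          acc ++ [String.ofList (letterGram.map (fun letter =>
            if letter = '*' then subPattern else [PySem.Chars.lowerChar letter])).flatten]
        else acc) matchedPatterns) []

-- ===== PORT B =====
def create_letter_pattern_py_alt (givenWord : String) (guessedLetters : List String) : List String :=
  let subPattern := ['(', '[', '^'] ++ PySem.Chars.join [] (guessedLetters.map (fun l => PySem.Chars.lower l.toList)) ++ [']', ')']
  let w := PySem.Chars.lower givenWord.toList
  let L := w.length
  -- pre[-1] on the nonempty accumulator is its last element
  let pre : List Int := w.foldl (fun pre c => pre ++ [pre.getLastD 0 + (if c = '*' then 1 else 0)]) [(0 : Int)]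
  let numOfKnown : Int := (L : Int) - PySem.List.pyGetD pre (L : Int) 0
  (PySem.List.pyRange 2 (numOfKnown + 2)).foldl (fun matchedPatterns len =>
    (PySem.List.pyRange 0 ((L : Int) - len + 1)).foldl (fun acc i =>
      if PySem.List.pyGetD pre (i + len) 0 - PySem.List.pyGetD pre i 0 = 1 then
        let seg := PySem.List.slice w (some i) (some (i + len))
        match PySem.List.index? seg '*' with
        | some j => acc ++ [String.ofList (seg.take j ++ subPattern ++ seg.drop (j + 1))]
        | none => acc   -- unreachable: the window holds exactly one '*'
      else acc) matchedPatterns) []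

-- ===== PRECONDITION & SPEC =====
def Spec_create_letter_pattern_py (givenWord : String) (guessedLetters : List String) (out : List String) : Prop := out = create_letter_pattern_py_alt givenWord guessedLetters
instance (givenWord : String) (guessedLetters : List String) (out : List String) : Decidable (Spec_create_letter_pattern_py givenWord guessedLetters out) := by unfold Spec_create_letter_pattern_py; infer_instance

-- ===== CLAIM (what is proved, stated in full; the proofs are below) =====
def Claim_equal_create_letter_pattern_py : Prop := ∀ (givenWord : String) (guessedLetters : List String), Dom_create_letter_pattern_py givenWord guessedLetters → Spec_create_letter_pattern_py givenWord guessedLetters (create_letter_pattern_py givenWord guessedLetters)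

-- ===== LEMMAS AND PROOFS =====

-- abbreviations used only by the proofs
def pvWinPat (sub seg : List Char) : String :=
  String.ofList (seg.take ((PySem.List.index? seg '*').getD 0) ++ sub
    ++ seg.drop ((PySem.List.index? seg '*').getD 0 + 1))

def pvCanon (sub w : List Char) (m : Nat) : List String :=
  (List.range m).flatMap (fun kn =>
    ((List.range (w.length + 1 - (kn + 2))).filter
        (fun i => ((w.drop i).take (kn + 2)).count '*' == 1)).map
      (fun i => pvWinPat sub ((w.drop i).take (kn + 2))))

theorem pvCountUnknown_eq (xs : List Char) : pvCountUnknown xs = (xs.count '*' : Int) := by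
  unfold pvCountUnknown
  have h1 : (List.map (fun _ => (1 : Int)) (List.filter (fun letter => letter == '*') xs)).sum
      = ((List.filter (fun letter => letter == '*') xs).length : Int) := by
    induction List.filter (fun letter => letter == '*') xs with
    | nil => simp
    | cons c cs ih =>
      simp only [List.map_cons, List.sum_cons, List.length_cons, ih]
      push_cast
      ring
  have h2 : (List.filter (fun letter => letter == '*') xs).length = xs.count '*' := by
    induction xs with
    | nil => rfl
    | cons c cs ih =>
      by_cases hc : c = '*' <;> simp [hc, ih]
  rw [h1, h2]

theorem pvLowerChar_toNat (c : Char) (h1 : 65 ≤ c.toNat) (h2 : c.toNat ≤ 90) :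
    (Char.ofNat (c.toNat + 32)).toNat = c.toNat + 32 := by
  rw [Char.toNat_ofNat, if_pos]
  exact Or.inl (by omega)

theorem pvLowerChar_idem (c : Char) :
    PySem.Chars.lowerChar (PySem.Chars.lowerChar c) = PySem.Chars.lowerChar c := by
  unfold PySem.Chars.lowerChar PySem.Chars.isupper
  split_ifs with h h2
  · simp only [Bool.and_eq_true, decide_eq_true_eq] at h h2
    have h1 : 65 ≤ c.toNat := h.1
    have h3 : c.toNat ≤ 90 := h.2
    have h4 : (Char.ofNat (c.toNat + 32)).toNat ≤ 90 := h2.2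
    rw [pvLowerChar_toNat c h1 h3] at h4
    omega
  · rfl
  · rfl

theorem pvLowerChar_star_iff (c : Char) : PySem.Chars.lowerChar c = '*' ↔ c = '*' := by
  unfold PySem.Chars.lowerChar PySem.Chars.isupper
  split_ifs with h
  · simp only [Bool.and_eq_true, decide_eq_true_eq] at h
    have h1 : 65 ≤ c.toNat := h.1
    have h3 : c.toNat ≤ 90 := h.2
    constructor <;> intro hc
    · exfalso
      have := congrArg Char.toNat hc
      rw [pvLowerChar_toNat c h1 h3] at this
      have h42 : ('*').toNat = 42 := by decide
      omega
    · exfalso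
      have := congrArg Char.toNat hc
      have h42 : ('*').toNat = 42 := by decide
      omega
  · exact Iff.rfl

theorem pvMem_lower_fix (xs : List Char) (c : Char) (hc : c ∈ PySem.Chars.lower xs) :
    PySem.Chars.lowerChar c = c := by
  simp only [PySem.Chars.lower, List.mem_map] at hc
  obtain ⟨c', _, rfl⟩ := hc
  exact pvLowerChar_idem c'

theorem pvLower_count_star (xs : List Char) :
    (PySem.Chars.lower xs).count '*' = xs.count '*' := by
  unfold PySem.Chars.lower
  induction xs with
  | nil => rfl
  | cons c cs ih =>
    simp only [List.map_cons, List.count_cons, ih]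
    by_cases hc : c = '*'
    · simp [hc, pvLowerChar_star_iff]
    · simp [hc, (pvLowerChar_star_iff c).not.mpr hc]

theorem pvLower_length (xs : List Char) : (PySem.Chars.lower xs).length = xs.length := by
  simp [PySem.Chars.lower]

-- closed form of pyRange with step 1
theorem pvPyRange_one_eq (a b : Int) :
    PySem.List.pyRange a b = (List.range (b - a).toNat).map (fun (k : Nat) => a + (k : Int)) := by
  rw [PySem.List.pyRange_of_pos a b (by omega)]
  by_cases hab : a < b
  · rw [if_pos hab]
    have : (b - a + 1 - 1) / 1 = b - a := by omega
    rw [this]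
    apply List.map_congr_left
    intro k _
    ring
  · rw [if_neg hab]
    have : (b - a).toNat = 0 := by omega
    rw [this]
    simp

-- the prefix-sum list B builds is the table of star counts of prefixes
theorem pvPre_spec (w : List Char) :
    w.foldl (fun pre c => pre ++ [pre.getLastD 0 + (if c = '*' then 1 else 0)]) [(0 : Int)]
      = (List.range (w.length + 1)).map (fun t => ((w.take t).count '*' : Int)) := by
  induction w using List.reverseRecOn with
  | nil => simp
  | append_singleton w c ih =>
    rw [List.foldl_append, ih]
    simp only [List.foldl_cons, List.foldl_nil]
    have hlast : ((List.range (w.length + 1)).map (fun t => ((w.take t).count '*' : Int))).getLastD 0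
        = (w.count '*' : Int) := by
      rw [List.range_succ, List.map_append]
      simp
    rw [hlast]
    have hlen : (w ++ [c]).length + 1 = (w.length + 1) + 1 := by simp
    rw [hlen, List.range_succ (n := w.length + 1), List.map_append]
    congr 1
    · apply List.map_congr_left
      intro t ht
      rw [List.mem_range] at ht
      rw [List.take_append_of_le_length (by omega)]
    · simp only [List.map_cons, List.map_nil]
      congr 1
      have : List.take (w.length + 1) (w ++ [c]) = w ++ [c] := by
        apply List.take_of_length_le
        simp
      rw [this, List.count_append]
      by_cases hc : c = '*' <;> simp [hc]

theorem pvPre_getD (w : List Char) (k : Nat) (hk : k ≤ w.length) :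
    PySem.List.pyGetD
        (w.foldl (fun pre c => pre ++ [pre.getLastD 0 + (if c = '*' then 1 else 0)]) [(0 : Int)])
        (k : Int) 0
      = ((w.take k).count '*' : Int) := by
  rw [pvPre_spec, PySem.List.pyGetD_natCast,
    PySem.List.getD_map_range _ _ _ _ (by omega)]

-- the n-gram zip enumerates exactly the windows of length n
theorem pvFindNgramGo_spec (w : List Char) :
    ∀ (n fuel : Nat), w.length < fuel → 1 ≤ n →
      pvFindNgramGo fuel ((List.range n).map (fun i => w.drop i))
        = (List.range (w.length + 1 - n)).map (fun i => (w.drop i).take n) := by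
  induction w with
  | nil =>
    intro n fuel hf hn
    obtain ⟨f, rfl⟩ : ∃ f, fuel = f + 1 := ⟨fuel - 1, by omega⟩
    rw [pvFindNgramGo]
    rw [if_pos (by simp)]
    rw [show ([] : List Char).length + 1 - n = 0 from by simp; omega]
    simp
  | cons c w' ih =>
    intro n fuel hf hn
    obtain ⟨f, rfl⟩ : ∃ f, fuel = f + 1 := ⟨fuel - 1, by omega⟩
    simp only [List.length_cons] at hf
    by_cases hbig : w'.length + 1 < n
    · -- no window of length n fits: some slice is already empty
      have hempty : (((List.range n).map (fun i => List.drop i (c :: w'))).any List.isEmpty) = true := by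
        rw [List.any_eq_true]
        refine ⟨List.drop (w'.length + 1) (c :: w'),
          List.mem_map.mpr ⟨w'.length + 1, List.mem_range.mpr (by omega), rfl⟩, ?_⟩
        simp only [List.isEmpty_iff, List.drop_eq_nil_iff]
        simp
      rw [pvFindNgramGo, if_pos (by simp [hempty])]
      have : (c :: w').length + 1 - n = 0 := by simp; omega
      rw [this]
      simp
    · -- n ≤ length: peel off the first window and recurse on the tail
      have hle : n ≤ w'.length + 1 := by omega
      have hnonempty : (((List.range n).map (fun i => List.drop i (c :: w'))).any List.isEmpty) = false := by
        rw [List.any_eq_false]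
        intro l hl
        rw [List.mem_map] at hl
        obtain ⟨i, hi, rfl⟩ := hl
        rw [List.mem_range] at hi
        simp only [Bool.not_eq_true, List.isEmpty_eq_false_iff, ne_eq, List.drop_eq_nil_iff]
        simp
        omega
      have hne : (((List.range n).map (fun i => List.drop i (c :: w'))).isEmpty) = false := by
        simp [List.range_eq_nil]
        omega
      rw [pvFindNgramGo, if_neg (by simp [hne, hnonempty])]
      have htails : ((List.range n).map (fun i => List.drop i (c :: w'))).map List.tail
          = (List.range n).map (fun i => w'.drop i) := by
        rw [List.map_map]
        apply List.map_congr_left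
        intro i _
        simp [List.tail_drop]
      rw [htails, ih n f (by omega) hn]
      have hsplit : (c :: w').length + 1 - n = (w'.length + 1 - n) + 1 := by simp; omega
      rw [hsplit, List.range_succ_eq_map]
      simp only [List.map_cons, List.map_map]
      congr 1
      · -- the heads form the first window
        apply List.ext_getElem
        · simp
          omega
        · intro i hi1 hi2
          simp only [List.length_map, List.length_range] at hi1
          simp only [List.getElem_map, List.getElem_range, List.getElem_take, Function.comp_apply]
          have hdrop : List.drop i (c :: w') ≠ [] := by
            rw [ne_eq, List.drop_eq_nil_iff]
            simp
            omega
          rw [List.headD_eq_head?, List.head?_eq_getElem?]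
          rw [List.getElem?_eq_getElem (by simp; omega)]
          simp

theorem pvFindNgram_spec (w : List Char) (n : Nat) (hn : 1 ≤ n) :
    pvFindNgram w (n : Int) = (List.range (w.length + 1 - n)).map (fun i => (w.drop i).take n) := by
  unfold pvFindNgram
  rw [PySem.List.pyRange_zero_natCast, List.map_map]
  have : ((fun i => PySem.List.slice w (some i) none) ∘ fun (k : Nat) => (k : Int))
      = fun (k : Nat) => w.drop k := by
    funext k
    exact PySem.List.slice_from_natCast w k
  rw [this]
  exact pvFindNgramGo_spec w n (w.length + 1) (by omega) hn

-- a window without '*', all of whose letters are lower-fixed, maps to itself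
theorem pvStarFree_flatten (sub : List Char) (xs : List Char) (hs : '*' ∉ xs)
    (hl : ∀ c ∈ xs, PySem.Chars.lowerChar c = c) :
    (xs.map (fun c => if c = '*' then sub else [PySem.Chars.lowerChar c])).flatten = xs := by
  induction xs with
  | nil => rfl
  | cons c cs ih =>
    have hc : c ≠ '*' := fun h => hs (h ▸ List.mem_cons_self)
    simp only [List.map_cons, List.flatten_cons, if_neg hc]
    rw [hl c List.mem_cons_self, ih (fun h => hs (List.mem_cons_of_mem _ h))
      (fun d hd => hl d (List.mem_cons_of_mem _ hd))]
    rfl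

-- a window with exactly one '*' splits at its index
theorem pvPattern_eq (sub seg : List Char) (h1 : seg.count '*' = 1)
    (hl : ∀ c ∈ seg, PySem.Chars.lowerChar c = c) :
    ∃ j, PySem.List.index? seg '*' = some j ∧
      (seg.map (fun c => if c = '*' then sub else [PySem.Chars.lowerChar c])).flatten
        = seg.take j ++ sub ++ seg.drop (j + 1) := by
  have hmem : '*' ∈ seg := List.count_pos_iff.mp (by omega)
  obtain ⟨j, hj⟩ := Option.isSome_iff_exists.mp ((PySem.List.index?_isSome_iff seg '*').mpr hmem)
  refine ⟨j, hj, ?_⟩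
  rw [PySem.List.index?_eq_some_iff] at hj
  obtain ⟨pre, suf, rfl, hlen, hpre⟩ := hj
  have hcpre : pre.count '*' = 0 := List.count_eq_zero.mpr hpre
  have hcsuf : suf.count '*' = 0 := by
    rw [List.count_append, List.count_cons] at h1
    simp at h1
    omega
  have hsuf : '*' ∉ suf := List.count_eq_zero.mp hcsuf
  rw [List.map_append, List.flatten_append,
    pvStarFree_flatten sub pre hpre (fun c hc => hl c (List.mem_append_left _ hc))]
  simp only [List.map_cons, List.flatten_cons, if_pos]
  rw [pvStarFree_flatten sub suf hsuf
    (fun c hc => hl c (List.mem_append_right _ (List.mem_cons_of_mem _ hc)))]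
  rw [List.take_left' hlen]
  have hdrop : List.drop (j + 1) (pre ++ '*' :: suf) = suf := by
    have : pre ++ '*' :: suf = (pre ++ ['*']) ++ suf := by simp
    rw [this, List.drop_left' (by simp [hlen])]
  rw [hdrop]
  simp

-- A's side equals the canonical enumeration
theorem pvA_eq (gw : String) (sub : List Char) :
    (PySem.List.pyRange 1 ((gw.toList.length : Int) - pvCountUnknown gw.toList + 1)).foldl
      (fun matchedPatterns thisNumOfKnown =>
        (pvFindNgram (PySem.Chars.lower gw.toList) (thisNumOfKnown + 1)).foldl
          (fun acc letterGram =>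
            if pvCountUnknown letterGram = 1 then
              acc ++ [String.ofList (letterGram.map (fun letter =>
                if letter = '*' then sub else [PySem.Chars.lowerChar letter])).flatten]
            else acc) matchedPatterns) []
    = pvCanon sub (PySem.Chars.lower gw.toList) (gw.toList.length - gw.toList.count '*') := by
  set w := PySem.Chars.lower gw.toList with hw
  set L0 := gw.toList.length with hL0
  set S := gw.toList.count '*' with hS
  have hSle : S ≤ L0 := by
    rw [hS, hL0]
    exact List.count_le_length
  have hwlen : w.length = L0 := pvLower_length gw.toList
  rw [pvCountUnknown_eq, pvPyRange_one_eq]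
  have hcnt : ((L0 : Int) - (S : Int) + 1 - 1).toNat = L0 - S := by omega
  rw [hcnt, List.foldl_map]
  have hbody : ∀ (acc : List String), ∀ kn ∈ List.range (L0 - S),
      (pvFindNgram w ((1 : Int) + (kn : Int) + 1)).foldl
        (fun acc letterGram =>
          if pvCountUnknown letterGram = 1 then
            acc ++ [String.ofList (letterGram.map (fun letter =>
              if letter = '*' then sub else [PySem.Chars.lowerChar letter])).flatten]
          else acc) acc
      = acc ++ ((List.range (w.length + 1 - (kn + 2))).filter
          (fun i => ((w.drop i).take (kn + 2)).count '*' == 1)).map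
          (fun i => pvWinPat sub ((w.drop i).take (kn + 2))) := by
    intro acc kn _
    have hcast : ((1 : Int) + (kn : Int) + 1) = ((kn + 2 : Nat) : Int) := by push_cast; ring
    rw [hcast, pvFindNgram_spec w (kn + 2) (by omega)]
    -- fold over the window list
    rw [List.foldl_map]
    have hcong : List.foldl
        (fun acc (i : Nat) =>
          if pvCountUnknown ((w.drop i).take (kn + 2)) = 1 then
            acc ++ [String.ofList (((w.drop i).take (kn + 2)).map (fun letter =>
              if letter = '*' then sub else [PySem.Chars.lowerChar letter])).flatten]
          else acc) acc (List.range (w.length + 1 - (kn + 2)))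
        = List.foldl
        (fun acc (i : Nat) =>
          if (((w.drop i).take (kn + 2)).count '*' == 1) = true then
            acc ++ [pvWinPat sub ((w.drop i).take (kn + 2))]
          else acc) acc (List.range (w.length + 1 - (kn + 2))) := by
      apply PySem.List.foldl_congr_mem
      intro acc i _
      set seg := (w.drop i).take (kn + 2) with hseg
      have hiff : (pvCountUnknown seg = 1) ↔ ((seg.count '*' == 1) = true) := by
        rw [pvCountUnknown_eq]
        simp
      by_cases hcond : pvCountUnknown seg = 1
      · rw [if_pos hcond, if_pos (hiff.mp hcond)]
        have hfix : ∀ c ∈ seg, PySem.Chars.lowerChar c = c := fun c hc =>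
          pvMem_lower_fix gw.toList c (List.mem_of_mem_drop (List.mem_of_mem_take hc))
        have hcount : seg.count '*' = 1 := by
          rw [pvCountUnknown_eq] at hcond
          exact_mod_cast hcond
        obtain ⟨j, hj, heq⟩ := pvPattern_eq sub seg hcount hfix
        rw [heq]
        unfold pvWinPat
        rw [hj]
        rfl
      · rw [if_neg hcond, if_neg (fun h => hcond (hiff.mpr h))]
    rw [hcong, PySem.List.foldl_append_if]
  rw [PySem.List.foldl_congr_mem _ _ _ _ hbody]
  rw [PySem.List.foldl_append_eq_flatMap]
  rw [List.nil_append]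
  rfl

-- B's side equals the canonical enumeration
theorem pvB_eq (gw : String) (sub : List Char) :
    (PySem.List.pyRange 2 (((PySem.Chars.lower gw.toList).length : Int) -
        PySem.List.pyGetD
          ((PySem.Chars.lower gw.toList).foldl
            (fun pre c => pre ++ [pre.getLastD 0 + (if c = '*' then 1 else 0)]) [(0 : Int)])
          ((PySem.Chars.lower gw.toList).length : Int) 0 + 2)).foldl
      (fun matchedPatterns len =>
        (PySem.List.pyRange 0 (((PySem.Chars.lower gw.toList).length : Int) - len + 1)).foldl
          (fun acc i =>
            if PySem.List.pyGetD
                  ((PySem.Chars.lower gw.toList).foldl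
                    (fun pre c => pre ++ [pre.getLastD 0 + (if c = '*' then 1 else 0)]) [(0 : Int)])
                  (i + len) 0
                - PySem.List.pyGetD
                  ((PySem.Chars.lower gw.toList).foldl
                    (fun pre c => pre ++ [pre.getLastD 0 + (if c = '*' then 1 else 0)]) [(0 : Int)])
                  i 0 = 1 then
              match PySem.List.index? (PySem.List.slice (PySem.Chars.lower gw.toList) (some i) (some (i + len))) '*' with
              | some j => acc ++ [String.ofList
                  ((PySem.List.slice (PySem.Chars.lower gw.toList) (some i) (some (i + len))).take j ++ sub
                    ++ (PySem.List.slice (PySem.Chars.lower gw.toList) (some i) (some (i + len))).drop (j + 1))]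
              | none => acc
            else acc) matchedPatterns) []
    = pvCanon sub (PySem.Chars.lower gw.toList) (gw.toList.length - gw.toList.count '*') := by
  set w := PySem.Chars.lower gw.toList with hw
  set L0 := gw.toList.length with hL0
  set S := gw.toList.count '*' with hS
  have hSle : S ≤ L0 := by
    rw [hS, hL0]
    exact List.count_le_length
  have hwlen : w.length = L0 := pvLower_length gw.toList
  have hwcount : w.count '*' = S := by
    rw [hw, hS]
    exact pvLower_count_star gw.toList
  have hclosing : PySem.List.pyGetD
      (w.foldl (fun pre c => pre ++ [pre.getLastD 0 + (if c = '*' then 1 else 0)]) [(0 : Int)])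
      ((w.length : Int)) 0 = (S : Int) := by
    rw [show ((w.length : Int)) = ((w.length : Nat) : Int) from rfl,
      pvPre_getD w w.length (le_refl _), List.take_of_length_le (le_refl _), hwcount]
  rw [hclosing, hwlen, pvPyRange_one_eq]
  have hcnt : ((L0 : Int) - (S : Int) + 2 - 2).toNat = L0 - S := by omega
  rw [hcnt, List.foldl_map]
  have hbody : ∀ (acc : List String), ∀ kn ∈ List.range (L0 - S),
      (PySem.List.pyRange 0 ((L0 : Int) - ((2 : Int) + (kn : Int)) + 1)).foldl
        (fun acc i =>
          if PySem.List.pyGetD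
                (w.foldl (fun pre c => pre ++ [pre.getLastD 0 + (if c = '*' then 1 else 0)]) [(0 : Int)])
                (i + ((2 : Int) + (kn : Int))) 0
              - PySem.List.pyGetD
                (w.foldl (fun pre c => pre ++ [pre.getLastD 0 + (if c = '*' then 1 else 0)]) [(0 : Int)])
                i 0 = 1 then
            match PySem.List.index? (PySem.List.slice w (some i) (some (i + ((2 : Int) + (kn : Int))))) '*' with
            | some j => acc ++ [String.ofList
                ((PySem.List.slice w (some i) (some (i + ((2 : Int) + (kn : Int))))).take j ++ sub
                  ++ (PySem.List.slice w (some i) (some (i + ((2 : Int) + (kn : Int))))).drop (j + 1))]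
            | none => acc
          else acc) acc
      = acc ++ ((List.range (w.length + 1 - (kn + 2))).filter
          (fun i => ((w.drop i).take (kn + 2)).count '*' == 1)).map
          (fun i => pvWinPat sub ((w.drop i).take (kn + 2))) := by
    intro acc kn hkn
    rw [List.mem_range] at hkn
    have hbound : ((L0 : Int) - ((2 : Int) + (kn : Int)) + 1) = ((L0 + 1 - (kn + 2) : Nat) : Int) := by
      omega
    rw [hbound, PySem.List.pyRange_zero_natCast, List.foldl_map, ← hwlen]
    have hcong : ∀ (acc : List String), ∀ i ∈ List.range (w.length + 1 - (kn + 2)),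
        (if PySem.List.pyGetD
              (w.foldl (fun pre c => pre ++ [pre.getLastD 0 + (if c = '*' then 1 else 0)]) [(0 : Int)])
              ((i : Int) + ((2 : Int) + (kn : Int))) 0
            - PySem.List.pyGetD
              (w.foldl (fun pre c => pre ++ [pre.getLastD 0 + (if c = '*' then 1 else 0)]) [(0 : Int)])
              (i : Int) 0 = 1 then
          match PySem.List.index? (PySem.List.slice w (some (i : Int)) (some ((i : Int) + ((2 : Int) + (kn : Int))))) '*' with
          | some j => acc ++ [String.ofList
              ((PySem.List.slice w (some (i : Int)) (some ((i : Int) + ((2 : Int) + (kn : Int))))).take j ++ sub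
                ++ (PySem.List.slice w (some (i : Int)) (some ((i : Int) + ((2 : Int) + (kn : Int))))).drop (j + 1))]
          | none => acc
        else acc)
        = (if (((w.drop i).take (kn + 2)).count '*' == 1) = true then
            acc ++ [pvWinPat sub ((w.drop i).take (kn + 2))]
          else acc) := by
      intro acc i hi
      rw [List.mem_range] at hi
      have hiL : i + (kn + 2) ≤ w.length := by omega
      set seg := (w.drop i).take (kn + 2) with hseg
      have hslice : PySem.List.slice w (some (i : Int)) (some ((i : Int) + ((2 : Int) + (kn : Int)))) = seg := by
        have : ((i : Int) + ((2 : Int) + (kn : Int))) = ((i : Int) + ((kn + 2 : Nat) : Int)) := by push_cast; ring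
        rw [this, PySem.List.slice_natCast_add]
      have hsum : ((i : Int) + ((2 : Int) + (kn : Int))) = (((i + (kn + 2) : Nat)) : Int) := by push_cast; ring
      have hdiff : PySem.List.pyGetD
            (w.foldl (fun pre c => pre ++ [pre.getLastD 0 + (if c = '*' then 1 else 0)]) [(0 : Int)])
            ((i : Int) + ((2 : Int) + (kn : Int))) 0
          - PySem.List.pyGetD
            (w.foldl (fun pre c => pre ++ [pre.getLastD 0 + (if c = '*' then 1 else 0)]) [(0 : Int)])
            (i : Int) 0 = (seg.count '*' : Int) := by
        rw [hsum, pvPre_getD w (i + (kn + 2)) hiL, pvPre_getD w i (by omega)]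
        rw [List.take_add, List.count_append]
        push_cast
        ring
      rw [hdiff, hslice]
      have hiff : ((seg.count '*' : Int) = 1) ↔ ((seg.count '*' == 1) = true) := by
        simp
      by_cases hcond : (seg.count '*' : Int) = 1
      · rw [if_pos hcond, if_pos (hiff.mp hcond)]
        have hcount : seg.count '*' = 1 := by exact_mod_cast hcond
        have hfix : ∀ c ∈ seg, PySem.Chars.lowerChar c = c := fun c hc =>
          pvMem_lower_fix gw.toList c (List.mem_of_mem_drop (List.mem_of_mem_take hc))
        obtain ⟨j, hj, _⟩ := pvPattern_eq sub seg hcount hfix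
        rw [hj]
        unfold pvWinPat
        rw [hj]
        rfl
      · rw [if_neg hcond, if_neg (fun h => hcond (hiff.mpr h))]
    rw [PySem.List.foldl_congr_mem _ _ _ _ (fun acc i hi => hcong acc i hi)]
    rw [PySem.List.foldl_append_if]
  rw [PySem.List.foldl_congr_mem _ _ _ _ hbody]
  rw [PySem.List.foldl_append_eq_flatMap]
  rw [List.nil_append]
  rfl

-- ===== VERDICT (by name: the statement is the Claim_ definition above) =====
theorem create_letter_pattern_py_spec : Claim_equal_create_letter_pattern_py := by
  intro gw gl _hdom
  unfold Spec_create_letter_pattern_py create_letter_pattern_py create_letter_pattern_py_alt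
  rw [pvA_eq gw, pvB_eq gw]
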